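-- pv_equiv track=rewrite | github.com/Miralius/LabsNumericalMethods | Lab2/functions.py | define_index_of_spline
-- ===== SOURCE A (Python) =====
-- def define_index_of_spline(x, x_int_l, order):
--     j = 1
--     while x >= x_int_l[j]:
--         if j + 1 == len(x_int_l):
--             break
--         else:
--             j += 1
--     return (j - 1) * (order + 1)
-- ===== SOURCE B (Python) =====
-- def define_index_of_spline(x, x_int_l, order):
--     # Divide-and-conquer computation of the length of the longest prefix of the
--     # interior breakpoints x_int_l[1:-1] that x has passed: split the range in
--     # half; if the whole left half is passed, add the right half's prefix.
--     interior = x_int_l[1:-1]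
--
--     def passed(lo, hi):
--         if hi - lo <= 0:
--             return 0
--         if hi - lo == 1:
--             return 1 if x >= interior[lo] else 0
--         mid = (lo + hi) // 2
--         left = passed(lo, mid)
--         if left == mid - lo:
--             return left + passed(mid, hi)
--         return left
--
--     return passed(0, len(interior)) * (order + 1)
-- ===== Notes on version B (the rewrite author's own statement) =====
-- stated objective: alternative
-- what changed: Replaces A's stateful while-loop (index j, break, clamp) with a divide-and-conquer recursion that computes the passed-prefix length of the interior slice x_int_l[1:-1] by halving the range and adding the right half only when the whole left half is passed.
import Mathlib
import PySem

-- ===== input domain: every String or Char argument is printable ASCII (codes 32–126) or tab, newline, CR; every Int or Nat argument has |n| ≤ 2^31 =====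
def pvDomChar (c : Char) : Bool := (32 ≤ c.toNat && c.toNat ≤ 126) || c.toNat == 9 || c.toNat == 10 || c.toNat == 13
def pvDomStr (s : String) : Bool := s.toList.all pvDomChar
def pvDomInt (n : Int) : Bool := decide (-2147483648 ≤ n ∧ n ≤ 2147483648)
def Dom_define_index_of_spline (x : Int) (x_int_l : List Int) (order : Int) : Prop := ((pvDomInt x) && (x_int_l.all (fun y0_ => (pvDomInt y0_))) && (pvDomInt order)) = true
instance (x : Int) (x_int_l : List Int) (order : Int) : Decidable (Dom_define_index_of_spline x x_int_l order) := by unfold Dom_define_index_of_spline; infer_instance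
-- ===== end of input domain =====

-- B replaces A's stateful while-loop (index j, break, clamp to the last interval) by a
-- divide-and-conquer recursion computing the passed-prefix length of x_int_l[1:-1].

-- ===== PORT A =====
-- the while loop: state j; A reads x_int_l[j] each iteration (out-of-range = Python
-- IndexError, excluded by Pre_; the 'else' arm of the dite is never reached under Pre_)
def aLoop (x : Int) (x_int_l : List Int) : Nat → Nat → Nat
  | j, 0 => j
  | j, fuel + 1 =>
    if h : j < x_int_l.length then
      if x ≥ x_int_l[j] then
        if j + 1 = x_int_l.length then j
        else aLoop x x_int_l (j + 1) fuel
      else j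
    else j

def define_index_of_spline (x : Int) (x_int_l : List Int) (order : Int) : Int :=
  ((aLoop x x_int_l 1 x_int_l.length : Int) - 1) * (order + 1)

-- ===== PORT B =====
-- Source B's inner 'passed(lo, hi)': halve the range; interior[lo] is always in range at
-- the one place it is read (lo < hi ≤ len), so getD's default is never used
def bGo (x : Int) (a : List Int) : Nat → Nat → Nat → Nat
  | _, _, 0 => 0
  | lo, hi, fuel + 1 =>
    if hi ≤ lo then 0
    else if hi - lo = 1 then (if x ≥ a.getD lo 0 then 1 else 0)
    else
      let mid := (lo + hi) / 2
      let left := bGo x a lo mid fuel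
      if left = mid - lo then left + bGo x a mid hi fuel else left

def define_index_of_spline_alt (x : Int) (x_int_l : List Int) (order : Int) : Int :=
  (bGo x (PySem.List.slice x_int_l (some 1) (some (-1))) 0
      (PySem.List.slice x_int_l (some 1) (some (-1))).length
      (PySem.List.slice x_int_l (some 1) (some (-1))).length : Int) * (order + 1)

-- ===== PRECONDITION & SPEC =====
-- A reads x_int_l[1] unconditionally, so it raises IndexError whenever len < 2.
def Pre_define_index_of_spline (x : Int) (x_int_l : List Int) (order : Int) : Prop :=
  2 ≤ x_int_l.length
instance (x : Int) (x_int_l : List Int) (order : Int) : Decidable (Pre_define_index_of_spline x x_int_l order) := by unfold Pre_define_index_of_spline; infer_instance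

def pvWitness_define_index_of_spline : Int × List Int × Int := (3, [0, 2, 5, 7], 2)

def Spec_define_index_of_spline (x : Int) (x_int_l : List Int) (order : Int) (out : Int) : Prop := out = define_index_of_spline_alt x x_int_l order
instance (x : Int) (x_int_l : List Int) (order : Int) (out : Int) : Decidable (Spec_define_index_of_spline x x_int_l order out) := by unfold Spec_define_index_of_spline; infer_instance

-- ===== CLAIM (what is proved, stated in full; the proofs are below) =====
def Claim_equal_define_index_of_spline : Prop := ∀ (x : Int) (x_int_l : List Int) (order : Int), Dom_define_index_of_spline x x_int_l order → Pre_define_index_of_spline x x_int_l order → Spec_define_index_of_spline x x_int_l order (define_index_of_spline x x_int_l order)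

-- ===== LEMMAS AND PROOFS =====

-- proof-side characterisation: length of the longest passed prefix
def prefixLen (x : Int) : List Int → Nat
  | [] => 0
  | t :: ts => if x ≥ t then 1 + prefixLen x ts else 0

-- loop invariant: from position j (1 ≤ j ≤ n-1, enough fuel), A's loop lands at j plus
-- the prefix of interior breakpoints from j on that x has passed
lemma aLoop_eq_prefix (x : Int) (xl : List Int) (f : Nat) : ∀ j : Nat,
    1 ≤ j → j ≤ xl.length - 1 → 2 ≤ xl.length → xl.length ≤ j + f →
    aLoop x xl j f = j + prefixLen x ((xl.drop j).take (xl.length - 1 - j)) := by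
  induction f with
  | zero => intro j h1 h2 hn hf; omega
  | succ f ih =>
    intro j h1 h2 hn hf
    have hj : j < xl.length := by omega
    rcases Nat.lt_or_ge j (xl.length - 1) with hlt | hge
    · have htake : (xl.drop j).take (xl.length - 1 - j)
          = xl[j] :: ((xl.drop (j+1)).take (xl.length - 1 - (j+1))) := by
        rw [List.drop_eq_getElem_cons hj]
        have : xl.length - 1 - j = (xl.length - 1 - (j+1)) + 1 := by omega
        rw [this, List.take_succ_cons]
      rw [aLoop, dif_pos hj, htake]
      by_cases hx : x ≥ xl[j]
      · rw [if_pos hx]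
        have hne : ¬ (j + 1 = xl.length) := by omega
        rw [if_neg hne, ih (j+1) (by omega) (by omega) hn (by omega),
            prefixLen, if_pos hx]
        omega
      · rw [if_neg hx, prefixLen, if_neg hx]; omega
    · have htake : xl.length - 1 - j = 0 := by omega
      rw [aLoop, dif_pos hj, htake]
      simp only [List.take_zero, prefixLen]
      split_ifs with hx hlast
      · rfl
      · omega
      · rfl

lemma slice_interior (xl : List Int) (hn : 2 ≤ xl.length) :
    PySem.List.slice xl (some 1) (some (-1)) = (xl.drop 1).take (xl.length - 1 - 1) := by
  rw [show ((-1 : Int)) = -((1 : Nat) : Int) by norm_num,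
      PySem.List.slice, PySem.List.clampIdx_neg_natCast _ _ (by norm_num)]
  have h1 : PySem.List.clampIdx xl.length (1 : Int) = 1 := by
    have h := PySem.List.clampIdx_natCast xl.length 1
    push_cast at h
    omega
  rw [h1]

-- prefix length composes over concatenation
lemma prefixLen_append (x : Int) (s t : List Int) :
    prefixLen x (s ++ t)
      = if prefixLen x s = s.length then s.length + prefixLen x t else prefixLen x s := by
  induction s with
  | nil => simp [prefixLen]
  | cons a s ih =>
      simp only [List.cons_append, prefixLen, List.length_cons]
      by_cases hx : x ≥ a
      · rw [if_pos hx, if_pos hx, ih]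
        by_cases h : prefixLen x s = s.length
        · rw [if_pos h, if_pos (by omega)]; omega
        · rw [if_neg h, if_neg (by omega)]
      · rw [if_neg hx, if_neg hx, if_neg (by omega)]

-- the divide-and-conquer recursion computes the passed-prefix length of a[lo:hi]
lemma bGo_eq_prefix (x : Int) (a : List Int) (f : Nat) : ∀ lo hi : Nat,
    hi ≤ a.length → hi - lo ≤ f →
    bGo x a lo hi f = prefixLen x ((a.drop lo).take (hi - lo)) := by
  induction f with
  | zero =>
    intro lo hi hhi hf
    have h0 : hi - lo = 0 := by omega
    rw [bGo, h0]
    simp [prefixLen]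
  | succ f ih =>
    intro lo hi hhi hf
    rcases Nat.lt_or_ge lo hi with hlt | hge
    · by_cases h1 : hi - lo = 1
      · have hlo : lo < a.length := by omega
        rw [bGo, if_neg (by omega), if_pos h1, h1]
        rw [List.drop_eq_getElem_cons hlo, List.take_succ_cons, List.take_zero]
        have hg : a.getD lo 0 = a[lo] := by simp [List.getD_eq_getElem?_getD, hlo]
        rw [hg]
        by_cases hx : x ≥ a[lo] <;> simp [prefixLen, hx]
      · have h2 : 2 ≤ hi - lo := by omega
        have hmid1 : lo < (lo + hi) / 2 := by omega
        have hmid2 : (lo + hi) / 2 < hi := by omega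
        rw [bGo, if_neg (by omega), if_neg h1]
        have ihl := ih lo ((lo + hi) / 2) (by omega) (by omega)
        have ihr := ih ((lo + hi) / 2) hi hhi (by omega)
        simp only []
        have hsplit : (a.drop lo).take (hi - lo)
            = (a.drop lo).take ((lo + hi) / 2 - lo) ++ (a.drop ((lo + hi) / 2)).take (hi - (lo + hi) / 2) := by
          have : hi - lo = ((lo + hi) / 2 - lo) + (hi - (lo + hi) / 2) := by omega
          rw [this, List.take_add]
          congr 1
          rw [List.drop_drop, Nat.add_sub_cancel' hmid1.le]
        have hlen : ((a.drop lo).take ((lo + hi) / 2 - lo)).length = (lo + hi) / 2 - lo := by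
          have hm2 : (lo + hi) / 2 ≤ a.length := by omega
          rw [List.length_take, List.length_drop]
          exact Nat.min_eq_left (by omega)
        rw [hsplit, prefixLen_append, hlen, ihl, ihr]
        split_ifs with h
        · rw [h]
        · rfl
    · rw [bGo, if_pos (by omega)]
      have h0 : hi - lo = 0 := by omega
      simp [h0, prefixLen]

-- ===== VERDICT (by name: the statement is the Claim_ definition above) =====
theorem define_index_of_spline_spec : Claim_equal_define_index_of_spline := by
  intro x xl order _ hpre
  unfold Spec_define_index_of_spline define_index_of_spline define_index_of_spline_alt
  have hn : 2 ≤ xl.length := hpre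
  rw [slice_interior xl hn,
      bGo_eq_prefix x ((xl.drop 1).take (xl.length - 1 - 1)) _ 0 _ (le_refl _) (by omega),
      Nat.sub_zero, List.drop_zero, List.take_length,
      aLoop_eq_prefix x xl xl.length 1 (by omega) (by omega) hn (by omega)]
  push_cast
  ring
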